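-- pv_equiv track=rewrite | github.com/capo-urjc/ffit | acme.py | adjust_coords
-- ===== SOURCE A (Python) =====
-- def adjust_coords(input_coords):
--     bounds = [[50, 57],   [58, 65],   [66, 73],   [74, 80],   [81, 94],   [95, 102],  [103, 110],   # Clock region X0
--               [111, 118], [119, 126], [127, 134], [135, 141], [142, 155], [156, 163], [164, 171],   # Clock region X1
--               [172, 221], [222, 234], [235, 245], [246, 251], [252, 258], [259, 269], [270, 281], [282, 286], [287, 293],   # Clock region X2
--               [294, 302], [303, 309], [310, 317], [318, 336], [337, 357]]   # Clock region X3
--     offsets = [0, 1, 2, 3, 4, 5, 6, 7, 8, 9, 10, 11, 12, 13, 57, 58, 59, 60, 61, 62, 63, 64, 65, 66, 67, 68, 69, 70]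
--
--     for coord in ["X_Lo", "X_Hi"]:
--         for o, b in zip(offsets, bounds):
--             if b[0] <= input_coords[coord] <= b[1]:
--                 input_coords[coord] -= o
--                 break
--     return input_coords
-- ===== SOURCE B (Python) =====
-- def adjust_coords(input_coords):
--     # same intervals as A, represented by their (contiguous) upper bounds, aligned with offsets
--     highs = [57, 65, 73, 80, 94, 102, 110, 118, 126, 134, 141, 155, 163, 171,
--              221, 234, 245, 251, 258, 269, 281, 286, 293, 302, 309, 317, 336, 357]
--     offsets = [0, 1, 2, 3, 4, 5, 6, 7, 8, 9, 10, 11, 12, 13,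
--                57, 58, 59, 60, 61, 62, 63, 64, 65, 66, 67, 68, 69, 70]
--     for coord in ("X_Lo", "X_Hi"):
--         x = input_coords[coord]
--         if 50 <= x <= 357:
--             # binary search (bisect_left) over the upper bounds
--             lo, hi = 0, len(highs)
--             while lo < hi:
--                 mid = (lo + hi) // 2
--                 if highs[mid] < x:
--                     lo = mid + 1
--                 else:
--                     hi = mid
--             input_coords[coord] = x - offsets[lo]
--     return input_coords
-- ===== Notes on version B (the rewrite author's own statement) =====
-- stated objective: alternative
-- what changed: Replaces A's linear first-match scan over 28 [low,high] interval pairs with a single 50..357 range guard plus a hand-written binary search (bisect_left) over the aligned list of interval upper bounds.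
import Mathlib
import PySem

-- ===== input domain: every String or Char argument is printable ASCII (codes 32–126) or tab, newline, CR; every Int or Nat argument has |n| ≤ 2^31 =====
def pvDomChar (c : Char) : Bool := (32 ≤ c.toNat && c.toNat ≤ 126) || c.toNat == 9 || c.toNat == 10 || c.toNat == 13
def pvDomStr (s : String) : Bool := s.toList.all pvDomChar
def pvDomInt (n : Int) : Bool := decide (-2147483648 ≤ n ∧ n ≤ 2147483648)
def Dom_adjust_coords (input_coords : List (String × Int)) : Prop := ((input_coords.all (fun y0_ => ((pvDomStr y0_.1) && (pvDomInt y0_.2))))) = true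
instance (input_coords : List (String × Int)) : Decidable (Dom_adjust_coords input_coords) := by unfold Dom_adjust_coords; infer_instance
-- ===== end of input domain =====

-- B replaces A's linear first-match scan over 28 interval pairs with a range guard plus a
-- binary search over the aligned interval upper bounds (alternative algorithm, same results;
-- both Pythons mutate the input dict in place — the equivalence proved is about the return value).


-- ===== PORT A =====
def boundsA : List (Int × Int) :=
  [(50, 57), (58, 65), (66, 73), (74, 80), (81, 94), (95, 102), (103, 110),
   (111, 118), (119, 126), (127, 134), (135, 141), (142, 155), (156, 163), (164, 171),
   (172, 221), (222, 234), (235, 245), (246, 251), (252, 258), (259, 269), (270, 281), (282, 286), (287, 293),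
   (294, 302), (303, 309), (310, 317), (318, 336), (337, 357)]

def offsetsA : List Int :=
  [0, 1, 2, 3, 4, 5, 6, 7, 8, 9, 10, 11, 12, 13, 57, 58, 59, 60, 61, 62, 63, 64, 65, 66, 67, 68, 69, 70]

-- 'for o, b in zip(offsets, bounds): if b[0] <= x <= b[1]: … break' — first matching offset, if any
def loopA (x : Int) : List (Int × (Int × Int)) → Option Int
  | [] => none
  | (o, b) :: rest => if b.1 ≤ x ∧ x ≤ b.2 then some o else loopA x rest

-- one 'coord' iteration of A's outer loop (dict read input_coords[coord]; Pre_ guarantees the key is present)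
def stepA (d : PySem.Dict String Int) (coord : String) : PySem.Dict String Int :=
  let x := d.getD coord 0
  match loopA x (offsetsA.zip boundsA) with
  | some o => d.insert coord (x - o)
  | none => d

def adjust_coords (input_coords : List (String × Int)) : List (String × Int) :=
  ((["X_Lo", "X_Hi"].foldl stepA (PySem.Dict.mk input_coords))).items

-- ===== PORT B =====
def highsB : List Int :=
  [57, 65, 73, 80, 94, 102, 110, 118, 126, 134, 141, 155, 163, 171,
   221, 234, 245, 251, 258, 269, 281, 286, 293, 302, 309, 317, 336, 357]

def offsetsB : List Int :=
  [0, 1, 2, 3, 4, 5, 6, 7, 8, 9, 10, 11, 12, 13, 57, 58, 59, 60, 61, 62, 63, 64, 65, 66, 67, 68, 69, 70]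

-- Source B's hand-written bisect_left while-loop, step for step
-- fuel = highsB.length bounds the iteration count (the loop halves hi-lo, which starts at 28)
def bsLoopB (x : Int) : Nat → Nat → Nat → Nat
  | lo, _, 0 => lo
  | lo, hi, fuel + 1 =>
    if lo < hi then
      let mid := (lo + hi) / 2
      if highsB.getD mid 0 < x then bsLoopB x (mid + 1) hi fuel else bsLoopB x lo mid fuel
    else lo

-- one 'coord' iteration of Source B's loop
def stepB (d : PySem.Dict String Int) (coord : String) : PySem.Dict String Int :=
  let x := d.getD coord 0
  if 50 ≤ x ∧ x ≤ 357 then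
    d.insert coord (x - offsetsB.getD (bsLoopB x 0 highsB.length highsB.length) 0)
  else d

def adjust_coords_alt (input_coords : List (String × Int)) : List (String × Int) :=
  ((["X_Lo", "X_Hi"].foldl stepB (PySem.Dict.mk input_coords))).items

-- ===== PRECONDITION & SPEC =====
-- Pre_ excludes exactly the inputs on which A raises KeyError: dicts missing the key "X_Lo" or "X_Hi".
def Pre_adjust_coords (input_coords : List (String × Int)) : Prop :=
  "X_Lo" ∈ input_coords.map Prod.fst ∧ "X_Hi" ∈ input_coords.map Prod.fst
instance (input_coords : List (String × Int)) : Decidable (Pre_adjust_coords input_coords) := by unfold Pre_adjust_coords; infer_instance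

def pvWitness_adjust_coords : (List (String × Int)) := [("X_Lo", 100), ("X_Hi", 250)]

def Spec_adjust_coords (input_coords : List (String × Int)) (out : List (String × Int)) : Prop := out = adjust_coords_alt input_coords
instance (input_coords : List (String × Int)) (out : List (String × Int)) : Decidable (Spec_adjust_coords input_coords out) := by unfold Spec_adjust_coords; infer_instance

-- ===== CLAIM (what is proved, stated in full; the proofs are below) =====
def Claim_equal_adjust_coords : Prop := ∀ (input_coords : List (String × Int)), Dom_adjust_coords input_coords → Pre_adjust_coords input_coords → Spec_adjust_coords input_coords (adjust_coords input_coords)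

-- ===== LEMMAS AND PROOFS =====

-- A's first-match scan computes exactly B's guarded binary-search lookup, for every integer x
-- A's scan returns none when no interval matches
lemma loopA_none (x : Int) (l : List (Int × (Int × Int))) (h : ∀ p ∈ l, ¬(p.2.1 ≤ x ∧ x ≤ p.2.2)) :
    loopA x l = none := by
  induction l with
  | nil => rfl
  | cons p t ih =>
    rw [loopA, if_neg (h p (List.mem_cons_self))]
    exact ih fun q hq => h q (List.mem_cons_of_mem p hq)

set_option maxHeartbeats 2000000 in
lemma loopA_eq (x : Int) :
    loopA x (offsetsA.zip boundsA) =
      (if 50 ≤ x ∧ x ≤ 357 then some (offsetsB.getD (bsLoopB x 0 highsB.length highsB.length) 0) else none) := by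
  by_cases h : 50 ≤ x ∧ x ≤ 357
  · obtain ⟨h1, h2⟩ := h
    interval_cases x <;> decide
  · rw [if_neg h]
    refine loopA_none x _ fun p hp => ?_
    fin_cases hp <;> simp only [] <;> omega

lemma step_eq (d : PySem.Dict String Int) (coord : String) : stepA d coord = stepB d coord := by
  simp only [stepA, stepB, loopA_eq]
  split_ifs <;> rfl

-- ===== VERDICT (by name: the statement is the Claim_ definition above) =====
theorem adjust_coords_spec : Claim_equal_adjust_coords := by
  intro input_coords _ _
  unfold Spec_adjust_coords adjust_coords adjust_coords_alt
  simp only [List.foldl, step_eq]
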